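-- pv_equiv track=rewrite | github.com/varma59/Examcodes | getLatestKRequests.py | getLatestKRequests
-- ===== SOURCE A (Python) =====
-- def getLatestKRequests(requests, k):
--     result = []
--     recent_requests = set()
--     i = len(requests) - 1
--
--     while i >= 0 and k > 0:
--         if requests[i] not in recent_requests:
--             recent_requests.add(requests[i])
--             result.append(requests[i])
--             k -= 1
--         i -= 1
--
--     result.reverse()
--     return result
-- ===== SOURCE B (Python) =====
-- def getLatestKRequests(requests, k):
--     seen = {}
--     for r in requests:
--         if r in seen:
--             del seen[r]
--         seen[r] = None
--     if k <= 0: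
--         return []
--     return list(seen)[-k:]
-- ===== Notes on version B (the rewrite author's own statement) =====
-- stated objective: idiomatic
-- what changed: Replaces the backward index loop with early stop and explicit seen-set/reverse by a single forward pass building an order-preserving last-occurrence dedup dict, then a [-k:] slice of its keys (with an explicit k<=0 guard).
import Mathlib
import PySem

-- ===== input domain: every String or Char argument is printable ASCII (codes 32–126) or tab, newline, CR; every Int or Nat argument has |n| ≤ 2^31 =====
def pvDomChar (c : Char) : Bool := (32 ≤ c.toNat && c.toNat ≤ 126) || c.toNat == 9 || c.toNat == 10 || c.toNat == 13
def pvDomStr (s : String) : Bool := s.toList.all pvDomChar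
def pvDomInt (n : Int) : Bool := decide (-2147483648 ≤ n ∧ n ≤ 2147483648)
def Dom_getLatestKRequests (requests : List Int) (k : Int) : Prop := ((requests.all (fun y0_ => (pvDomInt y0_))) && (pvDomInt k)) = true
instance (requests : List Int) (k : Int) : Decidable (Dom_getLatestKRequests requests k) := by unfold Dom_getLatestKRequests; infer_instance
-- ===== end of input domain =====

-- B replaces A's backward early-stop scan with a forward order-preserving dict dedup
-- (delete-and-reinsert to track last occurrences) followed by a [-k:] slice; objective: idiomatic.


-- ===== PORT A =====
-- while loop: the counter i+1 encodes Python's i (i ≥ 0 becomes the counter being a successor);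
-- requests[i] is always in range here (i starts at len-1 and only decreases), so List.getD is exact.
def getLatestKRequestsLoop (requests : List Int) : Nat → Int → PySem.Set Int → List Int → List Int
  | 0, _, _, result => result
  | i + 1, k, seen, result =>
    if k > 0 then
      let x := requests.getD i 0
      if PySem.Set.contains seen x then
        getLatestKRequestsLoop requests i k seen result
      else
        getLatestKRequestsLoop requests i (k - 1) (PySem.Set.add seen x) (result ++ [x])
    else result

def getLatestKRequests (requests : List Int) (k : Int) : List Int :=
  (getLatestKRequestsLoop requests requests.length k PySem.Set.empty []).reverse

-- ===== PORT B =====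
def getLatestKRequests_alt (requests : List Int) (k : Int) : List Int :=
  let seen := requests.foldl
    (fun d r => (if d.contains r then d.erase r else d).insert r (() : Unit)) PySem.Dict.empty
  if k ≤ 0 then [] else PySem.List.slice seen.keys (some (-k)) none

-- ===== PRECONDITION & SPEC =====
def Spec_getLatestKRequests (requests : List Int) (k : Int) (out : List Int) : Prop := out = getLatestKRequests_alt requests k
instance (requests : List Int) (k : Int) (out : List Int) : Decidable (Spec_getLatestKRequests requests k out) := by unfold Spec_getLatestKRequests; infer_instance

-- ===== CLAIM (what is proved, stated in full; the proofs are below) =====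
def Claim_equal_getLatestKRequests : Prop := ∀ (requests : List Int) (k : Int), Dom_getLatestKRequests requests k → Spec_getLatestKRequests requests k (getLatestKRequests requests k)

-- ===== LEMMAS AND PROOFS =====

-- mathematical middle ground: first occurrences of a list, skipping a seen-set
def ddFrom (s : Finset Int) : List Int → List Int
  | [] => []
  | y :: t => if y ∈ s then ddFrom s t else y :: ddFrom (insert y s) t

lemma ddFrom_disjoint (s : Finset Int) (t : List Int) : ∀ y ∈ ddFrom s t, y ∉ s := by
  induction t generalizing s with
  | nil => simp [ddFrom]
  | cons a t ih =>
    intro y hy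
    simp only [ddFrom] at hy
    split at hy
    · exact ih s y hy
    · rcases List.mem_cons.mp hy with rfl | h
      · assumption
      · have := ih (insert a s) y h
        exact fun hs => this (Finset.mem_insert_of_mem hs)

lemma ddFrom_insert (s : Finset Int) (x : Int) (t : List Int) :
    ddFrom (insert x s) t = (ddFrom s t).filter (fun y => !(y == x)) := by
  induction t generalizing s with
  | nil => simp [ddFrom]
  | cons a t ih =>
    by_cases ha : a ∈ s
    · simp [ddFrom, ha, Finset.mem_insert_of_mem ha, ih]
    · by_cases hax : a = x
      · subst hax
        simp only [ddFrom, Finset.mem_insert_self, if_true, ha, if_false,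
          List.filter_cons, BEq.rfl, Bool.not_true]
        symm
        apply List.filter_eq_self.mpr
        intro y hy
        have := ddFrom_disjoint (insert a s) t y hy
        simp only [Bool.not_eq_true', beq_eq_false_iff_ne, ne_eq]
        intro h; subst h; exact this (Finset.mem_insert_self y s)
      · have hmem : a ∉ insert x s := by
          simp [Finset.mem_insert, hax, ha]
        have hcomm : insert a (insert x s) = insert x (insert a s) := Finset.insert_comm a x s
        simp only [ddFrom, hmem, if_false, ha, List.filter_cons]
        rw [hcomm, ih]
        simp [hax]

-- A's loop re-expressed as structural recursion on the reversed prefix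
def collectA : List Int → Int → PySem.Set Int → List Int → List Int
  | [], _, _, acc => acc
  | x :: t, k, seen, acc =>
    if k > 0 then
      if PySem.Set.contains seen x then collectA t k seen acc
      else collectA t (k - 1) (PySem.Set.add seen x) (acc ++ [x])
    else acc

lemma loop_eq_collectA (requests : List Int) (i : Nat) (hi : i ≤ requests.length) :
    ∀ (k : Int) (seen : PySem.Set Int) (acc : List Int),
      getLatestKRequestsLoop requests i k seen acc = collectA (requests.take i).reverse k seen acc := by
  induction i with
  | zero => intro k seen acc; simp [getLatestKRequestsLoop, collectA]
  | succ i ih =>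
    intro k seen acc
    have hlt : i < requests.length := Nat.lt_of_succ_le hi
    have htake : (requests.take (i + 1)).reverse = requests.getD i 0 :: (requests.take i).reverse := by
      rw [List.take_add_one]
      simp [List.getElem?_eq_getElem hlt]
    rw [htake]
    simp only [getLatestKRequestsLoop, collectA]
    split
    · split
      · exact ih (Nat.le_of_succ_le hi) _ _ _
      · exact ih (Nat.le_of_succ_le hi) _ _ _
    · rfl

lemma set_contains_iff (S : PySem.Set Int) (x : Int) :
    PySem.Set.contains S x = true ↔ x ∈ S.toFinset := by
  simp [PySem.Set.contains]

lemma collectA_eq_ddFrom (t : List Int) :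
    ∀ (k : Int) (S : PySem.Set Int) (acc : List Int),
      collectA t k S acc = acc ++ (ddFrom S.toFinset t).take k.toNat := by
  induction t with
  | nil => intro k S acc; simp [collectA, ddFrom]
  | cons x t ih =>
    intro k S acc
    by_cases hk : k > 0
    · by_cases hx : PySem.Set.contains S x = true
      · have hxm : x ∈ S.toFinset := (set_contains_iff S x).mp hx
        simp only [collectA, hk, if_true, hx, if_true, ddFrom, hxm]
        exact ih k S acc
      · have hxm : x ∉ S.toFinset := fun h => hx ((set_contains_iff S x).mpr h)
        have hadd : (PySem.Set.add S x).toFinset = insert x S.toFinset := by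
          have hxl : x ∉ S := fun h => hxm (List.mem_toFinset.mpr h)
          simp only [PySem.Set.add, PySem.Set.contains]
          rw [if_neg (by simpa using hxl)]
          ext y; simp
        have hnat : k.toNat = (k - 1).toNat + 1 := by omega
        simp only [collectA, hk, if_true, hx, if_false, ddFrom, hxm]
        rw [ih (k - 1) (PySem.Set.add S x) (acc ++ [x]), hadd, hnat]
        simp [List.take_succ_cons]
    · have : k.toNat = 0 := by omega
      simp [collectA, hk, this]

-- A's whole result, characterised
lemma portA_eq (requests : List Int) (k : Int) :
    getLatestKRequests requests k = ((ddFrom ∅ requests.reverse).take k.toNat).reverse := by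
  unfold getLatestKRequests
  rw [loop_eq_collectA requests requests.length le_rfl, List.take_length,
    collectA_eq_ddFrom]
  simp [PySem.Set.empty]

-- one step of B's dict loop, on the keys
lemma keys_step (d : PySem.Dict Int Unit) (x : Int) :
    ((if d.contains x then d.erase x else d).insert x (() : Unit)).keys
      = d.keys.filter (fun y => !(y == x)) ++ [x] := by
  by_cases hc : d.contains x = true
  · have hnc : (d.erase x).contains x = false := by
      simp [PySem.Dict.erase, PySem.Dict.contains, List.any_filter]
    rw [if_pos hc, PySem.Dict.keys_insert_of_not_contains _ _ hnc]
    simp [PySem.Dict.erase, PySem.Dict.keys, List.filter_map, Function.comp_def]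
  · have hnc : d.contains x = false := by simpa using hc
    rw [if_neg hc, PySem.Dict.keys_insert_of_not_contains _ _ hnc]
    have : d.keys.filter (fun y => !(y == x)) = d.keys := by
      apply List.filter_eq_self.mpr
      intro y hy
      simp only [Bool.not_eq_true', beq_eq_false_iff_ne, ne_eq]
      intro h; subst h
      have : d.contains y = true := by
        simp only [PySem.Dict.contains, List.any_eq_true]
        obtain ⟨p, hp, hpy⟩ := List.mem_map.mp hy
        exact ⟨p, hp, by simp [hpy]⟩
      simp [this] at hnc
    rw [this]

-- B's dict loop, characterised: keys in last-occurrence order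
lemma keys_fold (requests : List Int) :
    (requests.foldl
      (fun d r => (if d.contains r then d.erase r else d).insert r (() : Unit))
      PySem.Dict.empty).keys = (ddFrom ∅ requests.reverse).reverse := by
  induction requests using List.reverseRecOn with
  | nil => simp [PySem.Dict.empty, PySem.Dict.keys, ddFrom]
  | append_singleton xs x ih =>
    rw [List.foldl_append, List.foldl_cons, List.foldl_nil, keys_step, ih,
      List.reverse_append]
    simp only [List.reverse_cons, List.reverse_nil, List.nil_append, List.singleton_append,
      ddFrom, Finset.notMem_empty, if_false, ddFrom_insert]
    rw [List.filter_reverse]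

-- ===== VERDICT (by name: the statement is the Claim_ definition above) =====
theorem getLatestKRequests_spec : Claim_equal_getLatestKRequests := by
  intro requests k _
  unfold Spec_getLatestKRequests getLatestKRequests_alt
  simp only
  rw [keys_fold, portA_eq]
  by_cases hk : k ≤ 0
  · have : k.toNat = 0 := by omega
    simp [hk, this]
  · have hk' : 0 < k := by omega
    have hkn : 0 < k.toNat := by omega
    have hkk : -k = -((k.toNat : Int)) := by omega
    rw [if_neg hk, hkk, PySem.List.slice_from_neg_natCast _ _ hkn, List.length_reverse,
      ← List.reverse_take]
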